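-- pv_equiv track=rewrite | github.com/pypi-data/pypi-mirror-53 | packages/puffotter/puffotter-0.4.0-py3-none-any.whl/puffotter/units.py | byte_string_to_byte_count
-- ===== SOURCE A (Python) =====
-- def byte_string_to_byte_count(byte_string: str) -> int:
--     """
--     Converts a string representing bytes to a number of bytes.
--     For example: "500K" -> 500 000
--                  "2.5M" -> 2 500 000
--                  "10GB" -> 10 000 000 000
--                  "30kb/s" -> 30 000
--     :param byte_string: The string to convert
--     :return: The amount of bytes
--     """
--     byte_string = byte_string.lower()
--
--     units = {
--         "k": 1000,
--         "m": 1000000,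
--         "g": 1000000000,
--         "t": 1000000000000,
--         "p": 1000000000000000,
--         "e": 1000000000000000000
--     }
--
--     for unit in units:
--         byte_string = byte_string.replace(unit + "b/s", unit)
--         byte_string = byte_string.replace(unit + "b", unit)
--
--     multiplier = 1
--     byte_num = ""
--     for i, char in enumerate(byte_string):
--         if char.isdigit():
--             byte_num += char
--         else:
--             # Unit should be last symbol in string
--             if len(byte_string) - 1 != i:
--                 raise ValueError()
--             else:
--                 try:
--                     multiplier = units[char]
--                 except KeyError:
--                     raise ValueError()
--
--     return multiplier * int(byte_num)
-- ===== SOURCE B (Python) =====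
-- def byte_string_to_byte_count(byte_string: str) -> int:
--     """Parse a byte-size string ("500K", "10GB", "30kb/s") into a byte count."""
--     units = {
--         "k": 1000,
--         "m": 1000000,
--         "g": 1000000000,
--         "t": 1000000000000,
--         "p": 1000000000000000,
--         "e": 1000000000000000000
--     }
--
--     s = byte_string.lower()
--     for unit in units:
--         s = s.replace(unit + "b/s", unit).replace(unit + "b", unit)
--
--     if s and s[-1] in units:
--         num, multiplier = s[:-1], units[s[-1]]
--     else:
--         num, multiplier = s, 1
--
--     if not num.isdigit():
--         raise ValueError()
--     return multiplier * int(num)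
-- ===== Notes on version B (the rewrite author's own statement) =====
-- stated objective: simpler
-- what changed: Replaces A's indexed character-by-character scan (enumerate loop with accumulator string, positional last-symbol check and KeyError handling) by a direct suffix split: take the optional trailing unit letter off the cleaned string and validate the rest with one str.isdigit() call.
import Mathlib
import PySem

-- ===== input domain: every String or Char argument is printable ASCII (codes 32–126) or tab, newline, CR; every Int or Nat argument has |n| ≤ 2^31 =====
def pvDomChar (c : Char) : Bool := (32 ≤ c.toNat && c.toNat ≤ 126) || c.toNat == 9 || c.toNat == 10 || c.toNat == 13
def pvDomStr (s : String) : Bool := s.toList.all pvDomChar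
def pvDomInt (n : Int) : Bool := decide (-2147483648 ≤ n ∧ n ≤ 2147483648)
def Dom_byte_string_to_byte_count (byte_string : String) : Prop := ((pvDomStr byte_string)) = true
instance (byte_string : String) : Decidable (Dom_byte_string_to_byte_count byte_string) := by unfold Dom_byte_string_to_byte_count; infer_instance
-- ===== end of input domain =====

-- B parses the cleaned string by splitting off the optional trailing unit letter and validating the
-- digit part with one isdigit test, instead of A's indexed per-character scan; same cost.

-- shared context: the units dict and the suffix-cleaning loop, identical lines in both Pythons
def pvUnits : PySem.Dict Char Int :=
  PySem.Dict.ofList [('k', 1000), ('m', 1000000), ('g', 1000000000),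
                     ('t', 1000000000000), ('p', 1000000000000000), ('e', 1000000000000000000)]

-- byte_string.lower(); for unit in units: replace(unit+"b/s", unit); replace(unit+"b", unit)
def pvClean (cs : List Char) : List Char :=
  pvUnits.items.foldl
    (fun acc p =>
      PySem.Chars.replace (PySem.Chars.replace acc [p.1, 'b', '/', 's'] [p.1]) [p.1, 'b'] [p.1])
    (PySem.Chars.lower cs)

-- ===== PORT A =====
-- A's scan state: none = ValueError already raised; some (multiplier, byte_num)
def pvStepA (n : Int) (st : Option (Int × List Char)) (p : Int × Char) : Option (Int × List Char) :=
  match st with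
  | none => none
  | some (m, num) =>
    if PySem.Chars.isdigit p.2 then some (m, num ++ [p.2])
    else if n - 1 ≠ p.1 then none
    else
      match pvUnits.get? p.2 with
      | some v => some (v, num)
      | none => none

-- the enumerate loop and the final 'multiplier * int(byte_num)' of A, on the cleaned string
def pvParseA (bs : List Char) : Int :=
  match (PySem.List.enumerate bs 0).foldl (pvStepA (bs.length : Int)) (some ((1 : Int), ([] : List Char))) with
  | none => 0                                   -- ValueError (outside Pre_)
  | some (m, num) =>
    match PySem.Int.ofChars? num with
    | none => 0                                 -- int('') ValueError (outside Pre_)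
    | some v => m * v

def byte_string_to_byte_count (byte_string : String) : Int :=
  pvParseA (pvClean byte_string.toList)

-- ===== PORT B =====
-- B's suffix split: 'if s and s[-1] in units: num, multiplier = s[:-1], units[s[-1]] else: s, 1'
def pvParseB (s : List Char) : Int :=
  let nm : List Char × Int :=
    match s.getLast? with
    | some ch =>
      match pvUnits.get? ch with
      | some m => (s.dropLast, m)
      | none => (s, 1)
    | none => (s, 1)
  if PySem.Chars.strIsdigit nm.1 then nm.2 * (PySem.Int.ofChars? nm.1).getD 0
  else 0                                        -- ValueError (outside Pre_)

def byte_string_to_byte_count_alt (byte_string : String) : Int :=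
  pvParseB (pvClean byte_string.toList)

-- ===== PRECONDITION & SPEC =====
-- Exactly the inputs on which the Python A returns: after the shared cleaning pass the string is one
-- or more digits optionally followed by a single unit letter; everywhere else both Pythons raise ValueError.
def Pre_byte_string_to_byte_count (byte_string : String) : Prop :=
  let l := pvClean byte_string.toList
  l ≠ [] ∧
  (if (pvUnits.get? (l.getLastD ' ')).isSome
   then l.dropLast ≠ [] ∧ PySem.Chars.strIsdigit l.dropLast = true
   else PySem.Chars.strIsdigit l = true)

instance (byte_string : String) : Decidable (Pre_byte_string_to_byte_count byte_string) := by
  unfold Pre_byte_string_to_byte_count; infer_instance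

def pvWitness_byte_string_to_byte_count : String := "500kb/s"

def Spec_byte_string_to_byte_count (byte_string : String) (out : Int) : Prop := out = byte_string_to_byte_count_alt byte_string
instance (byte_string : String) (out : Int) : Decidable (Spec_byte_string_to_byte_count byte_string out) := by unfold Spec_byte_string_to_byte_count; infer_instance

-- ===== CLAIM (what is proved, stated in full; the proofs are below) =====
def Claim_equal_byte_string_to_byte_count : Prop := ∀ (byte_string : String), Dom_byte_string_to_byte_count byte_string → Pre_byte_string_to_byte_count byte_string → Spec_byte_string_to_byte_count byte_string (byte_string_to_byte_count byte_string)

-- ===== LEMMAS AND PROOFS =====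

theorem pv_witness_ok :
    Dom_byte_string_to_byte_count pvWitness_byte_string_to_byte_count ∧
    Pre_byte_string_to_byte_count pvWitness_byte_string_to_byte_count := by decide

-- A's scan over a run of digits just appends them to byte_num
theorem foldA_digits (n : Int) (ds : List Char) (k m : Int) (num : List Char)
    (h : ∀ c ∈ ds, PySem.Chars.isdigit c = true) :
    (PySem.List.enumerate ds k).foldl (pvStepA n) (some (m, num)) = some (m, num ++ ds) := by
  induction ds generalizing k num with
  | nil => simp [PySem.List.enumerate_nil]
  | cons c t ih =>
    rw [PySem.List.enumerate_cons]
    simp only [List.foldl_cons, pvStepA, h c (List.mem_cons_self), if_pos]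
    rw [ih (k + 1) (num ++ [c]) (fun c hc => h c (List.mem_cons_of_mem _ hc))]
    simp

theorem pvUnits_eq_mk :
    pvUnits = PySem.Dict.mk [('k', 1000), ('m', 1000000), ('g', 1000000000),
      ('t', 1000000000000), ('p', 1000000000000000), ('e', 1000000000000000000)] := by decide

-- a unit letter is not a digit
theorem unit_not_digit (ch : Char) (h : (pvUnits.get? ch).isSome) :
    PySem.Chars.isdigit ch = false := by
  rw [pvUnits_eq_mk] at h
  simp only [PySem.Dict.get?_mk_cons] at h
  split_ifs at h with h1 h2 h3 h4 h5 h6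
  · exact (beq_iff_eq.mp h1) ▸ rfl
  · exact (beq_iff_eq.mp h2) ▸ rfl
  · exact (beq_iff_eq.mp h3) ▸ rfl
  · exact (beq_iff_eq.mp h4) ▸ rfl
  · exact (beq_iff_eq.mp h5) ▸ rfl
  · exact (beq_iff_eq.mp h6) ▸ rfl
  · simp [PySem.Dict.get?] at h

theorem enumerate_append_singleton (ds : List Char) (u : Char) (k : Int) :
    PySem.List.enumerate (ds ++ [u]) k
      = PySem.List.enumerate ds k ++ [(k + ds.length, u)] := by
  induction ds generalizing k with
  | nil => simp [PySem.List.enumerate_nil, PySem.List.enumerate_cons]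
  | cons c t ih =>
    simp only [List.cons_append, PySem.List.enumerate_cons, ih (k + 1), List.length_cons]
    have hk : k + ((t.length + 1 : Nat) : Int) = k + 1 + (t.length : Int) := by push_cast; ring
    rw [hk]

theorem strIsdigit_all (ds : List Char) :
    PySem.Chars.strIsdigit ds = (ds ≠ [] && ds.all PySem.Chars.isdigit) := by
  cases ds <;> simp [PySem.Chars.strIsdigit]

-- the heart of the claim: on a cleaned string of the accepted shape the two parsers agree
theorem pvParse_agree (l : List Char)
    (hne : l ≠ [])
    (hif : if (pvUnits.get? (l.getLastD ' ')).isSome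
           then l.dropLast ≠ [] ∧ PySem.Chars.strIsdigit l.dropLast = true
           else PySem.Chars.strIsdigit l = true) :
    pvParseA l = pvParseB l := by
  have hlast : l.getLast? = some (l.getLast hne) := List.getLast?_eq_some_getLast hne
  have hlastD : l.getLastD ' ' = l.getLast hne := by
    rw [List.getLastD_eq_getLast?, hlast]; rfl
  obtain ⟨ch, hch⟩ : ∃ ch, l.getLast hne = ch := ⟨_, rfl⟩
  rw [hch] at hlast hlastD
  have hdec : l = l.dropLast ++ [ch] := by
    conv_lhs => rw [← List.dropLast_append_getLast hne]
    rw [hch]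
  rw [hlastD] at hif
  unfold pvParseA pvParseB
  by_cases hu : (pvUnits.get? ch).isSome
  · rw [if_pos hu] at hif
    obtain ⟨hne', hdig0⟩ := hif
    have hdig := hdig0
    rw [strIsdigit_all] at hdig
    simp only [Bool.and_eq_true, decide_eq_true_eq, List.all_eq_true] at hdig
    obtain ⟨m, hm⟩ := Option.isSome_iff_exists.mp hu
    conv_lhs => rw [hdec]
    rw [enumerate_append_singleton, List.foldl_append,
        foldA_digits _ _ _ _ _ (fun c hc => hdig.2 c hc)]
    simp only [List.foldl_cons, List.foldl_nil, pvStepA,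
      unit_not_digit ch hu, Bool.false_eq_true, if_false, List.nil_append]
    have hlen : (((l.dropLast ++ [ch]).length : Int)) - 1 = 0 + (l.dropLast.length : Int) := by
      simp
    rw [if_neg (by rw [hlen]; simp)]
    simp only [hm, hlast]
    rw [if_pos hdig0]
    cases hofs : PySem.Int.ofChars? l.dropLast <;> simp
  · rw [if_neg hu] at hif
    have hif0 := hif
    rw [strIsdigit_all] at hif
    simp only [Bool.and_eq_true, decide_eq_true_eq, List.all_eq_true] at hif
    conv_lhs => rw [hdec]
    rw [enumerate_append_singleton, List.foldl_append,
        foldA_digits _ _ _ _ _ (fun c hc => hif.2 c (by rw [hdec]; exact List.mem_append_left _ hc))]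
    have hchd : PySem.Chars.isdigit ch = true := by
      rw [← hch]; exact hif.2 _ (l.getLast_mem hne)
    simp only [List.foldl_cons, List.foldl_nil, pvStepA, hchd, if_true, List.nil_append]
    simp only [hlast, Option.not_isSome_iff_eq_none.mp hu]
    rw [← hdec, if_pos hif0]
    cases hofs : PySem.Int.ofChars? l <;> simp

-- ===== VERDICT (by name: the statement is the Claim_ definition above) =====
theorem byte_string_to_byte_count_spec : Claim_equal_byte_string_to_byte_count := by
  intro s _ hpre
  unfold Spec_byte_string_to_byte_count byte_string_to_byte_count byte_string_to_byte_count_alt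
  unfold Pre_byte_string_to_byte_count at hpre
  generalize pvClean s.toList = l at hpre ⊢
  exact pvParse_agree l hpre.1 hpre.2
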